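-- pv_equiv track=rewrite | github.com/sohdesune/SUTD-projects | T3 2D - Primer Design.py | func_count_repeats
-- ===== SOURCE A (Python) =====
-- def func_count_repeats(sq):
--     repeats = 0
--     di_repeats = ['at','ac','ag','ca','ct','cg','ga','gt','gc','ta','tc','tg']
--
--     '''find repeats of the two-base sequences in di_repeats'''
--     for item in di_repeats:
--         count = 0
--         for i in range(len(sq)-4):
--             '''example: in tgtgtg, the first and second tg are counted'''
--             '''the third tg is not, so the number of repeats is 2'''
--             if sq[i:i+2] == item and sq[i+2:i+4] == item:
--                 count += 1
--                 j = i+2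
--                 while sq[j:j+2] == item and sq[j+2:j+4] == item:
--                     count += 1
--                     j += 2
--                 count = 0
--                 repeats += 1
--             else:
--                 count = 0
--
--     return repeats
-- ===== SOURCE B (Python) =====
-- def func_count_repeats(sq):
--     di_set = {'at', 'ac', 'ag', 'ca', 'ct', 'cg', 'ga', 'gt', 'gc', 'ta', 'tc', 'tg'}
--     return sum(1 for i in range(len(sq) - 4)
--                if sq[i:i+2] == sq[i+2:i+4] and sq[i:i+2] in di_set)
-- ===== Notes on version B (the rewrite author's own statement) =====
-- stated objective: simpler
-- what changed: Replaces 12 full scans of the string (one per dinucleotide, with a dead inner while-loop and dead count bookkeeping) by a single pass over the positions testing sq[i:i+2]==sq[i+2:i+4] plus one set-membership lookup.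
import Mathlib
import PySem

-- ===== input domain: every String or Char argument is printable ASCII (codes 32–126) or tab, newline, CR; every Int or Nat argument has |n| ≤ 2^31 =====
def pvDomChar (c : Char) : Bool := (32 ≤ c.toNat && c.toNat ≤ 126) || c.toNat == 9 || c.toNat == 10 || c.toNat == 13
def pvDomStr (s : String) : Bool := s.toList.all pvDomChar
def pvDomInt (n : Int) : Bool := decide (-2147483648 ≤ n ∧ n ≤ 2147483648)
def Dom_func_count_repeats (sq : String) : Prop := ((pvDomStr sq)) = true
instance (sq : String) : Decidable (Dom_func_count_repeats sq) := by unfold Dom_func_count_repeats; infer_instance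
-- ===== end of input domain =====

-- B replaces A's 12 full scans of the string (one per dinucleotide, with a dead inner
-- while-loop) by a single pass testing sq[i:i+2]==sq[i+2:i+4] plus one set lookup (simpler).

-- ===== PORT A =====
-- the literal list di_repeats (strings of length 2, kept as List Char for exact slicing)
def pvDiA : List (List Char) :=
  [['a','t'], ['a','c'], ['a','g'], ['c','a'], ['c','t'], ['c','g'],
   ['g','a'], ['g','t'], ['g','c'], ['t','a'], ['t','c'], ['t','g']]

-- the inner 'while sq[j:j+2] == item and sq[j+2:j+4] == item' loop; fuel makes it total
-- (a true test forces j+2 ≤ len and j grows by 2, so fuel = len is never exhausted)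
def pvWhileA (sql item : List Char) (count j : Int) : Nat → Int × Int
  | 0 => (count, j)
  | fuel + 1 =>
    if PySem.List.slice sql (some j) (some (j + 2)) = item ∧
       PySem.List.slice sql (some (j + 2)) (some (j + 4)) = item then
      pvWhileA sql item (count + 1) (j + 2) fuel
    else (count, j)

-- one step of the inner 'for i in range(len(sq)-4)' loop; state = (count, repeats)
def pvStepA (sql item : List Char) (st : Int × Int) (i : Int) : Int × Int :=
  if PySem.List.slice sql (some i) (some (i + 2)) = item ∧
     PySem.List.slice sql (some (i + 2)) (some (i + 4)) = item then
    let count := st.1 + 1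
    let _cj := pvWhileA sql item count (i + 2) sql.length  -- result unused, as in A
    let count := 0
    (count, st.2 + 1)
  else (0, st.2)

def func_count_repeats (sq : String) : Int :=
  let sql := sq.toList
  pvDiA.foldl
    (fun repeats item =>
      ((PySem.List.pyRange 0 ((sql.length : Int) - 4) 1).foldl
        (pvStepA sql item) (0, repeats)).2)
    0

-- ===== PORT B =====
def pvDiB : List (List Char) :=
  [['a','t'], ['a','c'], ['a','g'], ['c','a'], ['c','t'], ['c','g'],
   ['g','a'], ['g','t'], ['g','c'], ['t','a'], ['t','c'], ['t','g']]

def func_count_repeats_alt (sq : String) : Int :=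
  let sql := sq.toList
  let diSet : PySem.Set (List Char) := PySem.Set.ofList pvDiB
  (PySem.List.pyRange 0 ((sql.length : Int) - 4) 1).foldl
    (fun acc i =>
      if PySem.List.slice sql (some i) (some (i + 2)) =
           PySem.List.slice sql (some (i + 2)) (some (i + 4)) ∧
         PySem.List.slice sql (some i) (some (i + 2)) ∈ diSet then
        acc + 1
      else acc)
    0

-- ===== PRECONDITION & SPEC =====
def Spec_func_count_repeats (sq : String) (out : Int) : Prop := out = func_count_repeats_alt sq
instance (sq : String) (out : Int) : Decidable (Spec_func_count_repeats sq out) := by unfold Spec_func_count_repeats; infer_instance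

-- ===== CLAIM (what is proved, stated in full; the proofs are below) =====
def Claim_equal_func_count_repeats : Prop := ∀ (sq : String), Dom_func_count_repeats sq → Spec_func_count_repeats sq (func_count_repeats sq)

-- ===== LEMMAS AND PROOFS =====

-- A's condition for item at position i / B's combined condition at position i
def pvCondA (sql item : List Char) (i : Int) : Bool :=
  decide (PySem.List.slice sql (some i) (some (i + 2)) = item ∧
          PySem.List.slice sql (some (i + 2)) (some (i + 4)) = item)

def pvCondB (sql : List Char) (i : Int) : Bool :=
  decide (PySem.List.slice sql (some i) (some (i + 2)) =
            PySem.List.slice sql (some (i + 2)) (some (i + 4)) ∧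
          PySem.List.slice sql (some i) (some (i + 2)) ∈ PySem.Set.ofList pvDiB)

theorem pvDiB_eq_pvDiA : pvDiB = pvDiA := rfl

theorem pvStepA_eq (sql item : List Char) (st : Int × Int) (i : Int) :
    pvStepA sql item st i = if pvCondA sql item i then (0, st.2 + 1) else (0, st.2) := by
  simp only [pvStepA, pvCondA]
  split_ifs with h h' h' <;> simp_all

-- the repeats component of A's inner fold counts the positions satisfying pvCondA
theorem pvFoldA_snd (sql item : List Char) :
    ∀ (l : List Int) (st : Int × Int),
      (l.foldl (pvStepA sql item) st).2 = st.2 + (l.countP (pvCondA sql item) : Int) := by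
  intro l
  induction l with
  | nil => intro st; simp
  | cons i l ih =>
    intro st
    rw [List.foldl_cons, pvStepA_eq, List.countP_cons]
    cases hc : pvCondA sql item i
    · simp [ih]
    · simp only [ih]
      simp
      omega

-- B's fold counts the positions satisfying pvCondB
theorem pvFoldB (sql : List Char) :
    ∀ (l : List Int) (acc : Int),
      (l.foldl
        (fun acc i =>
          if PySem.List.slice sql (some i) (some (i + 2)) =
               PySem.List.slice sql (some (i + 2)) (some (i + 4)) ∧
             PySem.List.slice sql (some i) (some (i + 2)) ∈ PySem.Set.ofList pvDiB then
            acc + 1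
          else acc) acc) = acc + (l.countP (pvCondB sql) : Int) := by
  intro l
  induction l with
  | nil => intro acc; simp
  | cons i l ih =>
    intro acc
    rw [List.foldl_cons, List.countP_cons]
    by_cases h : PySem.List.slice sql (some i) (some (i + 2)) =
        PySem.List.slice sql (some (i + 2)) (some (i + 4)) ∧
        PySem.List.slice sql (some i) (some (i + 2)) ∈ PySem.Set.ofList pvDiB
    · have hb : pvCondB sql i = true := by simpa [pvCondB] using h
      rw [if_pos h, ih, hb]
      simp
      omega
    · have hb : pvCondB sql i = false := by simpa [pvCondB] using h
      rw [if_neg h, ih, hb]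
      simp

-- count of a fixed element by an equality predicate in a duplicate-free list
theorem pvCountP_eq_mem {α : Type} [DecidableEq α] (a : α) :
    ∀ (L : List α), L.Nodup →
      L.countP (fun x => decide (a = x)) = if a ∈ L then 1 else 0 := by
  intro L
  induction L with
  | nil => intro _; simp
  | cons b L ih =>
    intro hnd
    rw [List.countP_cons]
    rcases List.nodup_cons.1 hnd with ⟨hb, hL⟩
    by_cases hab : a = b
    · subst hab
      have : a ∉ L := hb
      simp [ih hL, this]
    · simp [ih hL, hab]

-- at one fixed position, exactly one of A's 12 items matches iff B's condition holds
theorem pvPoint_aux (s1 s2 : List Char) :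
    pvDiA.countP (fun item => decide (s1 = item ∧ s2 = item)) =
      if s1 = s2 ∧ s1 ∈ PySem.Set.ofList pvDiB then 1 else 0 := by
  by_cases h12 : s1 = s2
  · subst h12
    rw [List.countP_congr (q := fun x => decide (s1 = x)) (fun x _ => by simp)]
    rw [pvCountP_eq_mem s1 pvDiA (by decide)]
    by_cases hm : s1 ∈ pvDiA
    · have hset : s1 ∈ PySem.Set.ofList pvDiB :=
        (PySem.Set.mem_ofList _ _).2 (pvDiB_eq_pvDiA ▸ hm)
      simp [hm, hset]
    · have hset : s1 ∉ PySem.Set.ofList pvDiB := fun hc =>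
        hm (pvDiB_eq_pvDiA ▸ (PySem.Set.mem_ofList _ _).1 hc)
      simp [hm, hset]
  · rw [List.countP_eq_zero.2 (fun x _ => by
      simp only [decide_eq_true_eq, not_and]
      intro h1 h2
      exact h12 (h1.trans h2.symm))]
    simp [h12]

theorem pvPointwise (sql : List Char) (i : Int) :
    pvDiA.countP (fun item => pvCondA sql item i) = if pvCondB sql i then 1 else 0 := by
  simp only [pvCondA, pvCondB, decide_eq_true_eq]
  exact pvPoint_aux _ _

-- sum over a list of a pointwise sum of two functions splits
theorem pvSumMapAdd {α : Type} (f g : α → Nat) :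
    ∀ (L : List α), (L.map (fun x => f x + g x)).sum = (L.map f).sum + (L.map g).sum := by
  intro L
  induction L with
  | nil => simp
  | cons a L ih => simp [ih]; omega

-- a 0/1 sum over a list is a countP
theorem pvSumMapIte {α : Type} (p : α → Bool) :
    ∀ (L : List α), (L.map (fun x => if p x then 1 else 0)).sum = L.countP p := by
  intro L
  induction L with
  | nil => simp
  | cons a L ih => rw [List.map_cons, List.sum_cons, List.countP_cons, ih]; omega

-- summing A's per-item counts over the 12 items gives B's one-pass count
theorem pvSwap (sql : List Char) :
    ∀ (l : List Int),
      (pvDiA.map (fun item => l.countP (pvCondA sql item))).sum = l.countP (pvCondB sql) := by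
  intro l
  induction l with
  | nil => simp
  | cons i l ih =>
    simp only [List.countP_cons]
    rw [pvSumMapAdd (fun item => l.countP (pvCondA sql item))
        (fun item => if pvCondA sql item i then 1 else 0), ih,
        pvSumMapIte (fun item => pvCondA sql item i), pvPointwise]

-- A's outer fold equals the Int cast of the sum of the per-item counts
theorem pvOuterA (sql : List Char) (l : List Int) :
    ∀ (L : List (List Char)) (r : Int),
      L.foldl (fun repeats item => (l.foldl (pvStepA sql item) (0, repeats)).2) r =
        r + ((L.map (fun item => l.countP (pvCondA sql item))).sum : Int) := by
  intro L
  induction L with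
  | nil => intro r; simp
  | cons a L ih =>
    intro r
    rw [List.foldl_cons, ih, pvFoldA_snd, List.map_cons, List.sum_cons]
    push_cast
    ring

-- ===== VERDICT (by name: the statement is the Claim_ definition above) =====
theorem func_count_repeats_spec : Claim_equal_func_count_repeats := by
  intro sq _
  unfold Spec_func_count_repeats func_count_repeats func_count_repeats_alt
  simp only
  rw [pvFoldB, pvOuterA, pvSwap]
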